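-- pv_equiv track=rewrite | github.com/l00kingactual/l00kingactual | babylonian_to_arabic(babylonian_num).py | arabic_to_babylonian
-- ===== SOURCE A (Python) =====
-- def arabic_to_babylonian(arabic_num):
--     babylonian_dict = {1: '|', 10: '||', 100: '|||'}
--     babylonian_num = ''
--
--     for value in sorted(babylonian_dict.keys(), reverse=True):
--         while arabic_num >= value:
--             babylonian_num += babylonian_dict[value]
--             arabic_num -= value
--
--     return babylonian_num
-- ===== SOURCE B (Python) =====
-- def arabic_to_babylonian(arabic_num):
--     parts = []
--     for value, symbol in ((100, '|||'), (10, '||'), (1, '|')):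
--         if arabic_num >= value:
--             count = arabic_num // value
--             parts.append(symbol * count)
--             arabic_num -= count * value
--     return ''.join(parts)
-- ===== Notes on version B (the rewrite author's own statement) =====
-- stated objective: faster
-- what changed: replaces A's per-unit while-loop (one string append per subtracted unit) by one floor-division per symbol that computes the repeat count in closed form
import Mathlib
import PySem

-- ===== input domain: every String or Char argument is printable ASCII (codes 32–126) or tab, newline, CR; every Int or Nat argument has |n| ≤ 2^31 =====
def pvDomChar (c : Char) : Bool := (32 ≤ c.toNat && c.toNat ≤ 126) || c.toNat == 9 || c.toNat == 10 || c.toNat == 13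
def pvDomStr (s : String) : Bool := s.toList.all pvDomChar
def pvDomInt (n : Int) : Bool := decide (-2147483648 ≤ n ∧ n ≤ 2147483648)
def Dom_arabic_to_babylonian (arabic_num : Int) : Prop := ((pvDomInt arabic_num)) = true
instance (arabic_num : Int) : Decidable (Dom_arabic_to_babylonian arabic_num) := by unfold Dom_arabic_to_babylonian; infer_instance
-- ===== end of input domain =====

-- B replaces A's per-unit while-loop (one append per subtracted unit) by a single floor
-- division per symbol that yields the repeat count in closed form.

-- ===== PORT A =====
-- the inner 'while arabic_num >= value: babylonian_num += babylonian_dict[value]; arabic_num -= value';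
-- the '1 ≤ value' half of the guard is a totality guard only (every call site passes value ∈ {100, 10, 1})
def abWhile (value : Int) (symbol : String) (num : Int) (acc : String) : String × Int :=
  if 1 ≤ value ∧ value ≤ num then
    abWhile value symbol (num - value) (acc ++ symbol)
  else
    (acc, num)
termination_by num.toNat
decreasing_by omega

def arabic_to_babylonian (arabic_num : Int) : String :=
  let babylonian_dict : PySem.Dict Int String :=
    PySem.Dict.ofList [((1 : Int), "|"), (10, "||"), (100, "|||")]
  let init : String × Int := ("", arabic_num)
  let st :=
    (PySem.List.sorted (PySem.Dict.keys babylonian_dict) (fun k => k) true).foldl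
      (fun (st : String × Int) (value : Int) =>
        abWhile value (PySem.Dict.getD babylonian_dict value "") st.2 st.1) init
  st.1

-- ===== PORT B =====
-- Python's 'symbol * count': count concatenated copies of symbol — exact for 0 ≤ count (every use site has count ≥ 1)
def pyStrMul (symbol : String) (count : Int) : String :=
  PySem.Str.join "" (List.replicate count.toNat symbol)

def arabic_to_babylonian_alt (arabic_num : Int) : String :=
  let st :=
    ([((100 : Int), "|||"), (10, "||"), (1, "|")]).foldl
      (fun (st : List String × Int) (p : Int × String) =>
        if p.1 ≤ st.2 then
          let count := PySem.Int.floordiv st.2 p.1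
          (st.1 ++ [pyStrMul p.2 count], st.2 - count * p.1)
        else st) (([] : List String), arabic_num)
  PySem.Str.join "" st.1

-- ===== PRECONDITION & SPEC =====
def Spec_arabic_to_babylonian (arabic_num : Int) (out : String) : Prop := out = arabic_to_babylonian_alt arabic_num
instance (arabic_num : Int) (out : String) : Decidable (Spec_arabic_to_babylonian arabic_num out) := by unfold Spec_arabic_to_babylonian; infer_instance

-- ===== CLAIM (what is proved, stated in full; the proofs are below) =====
def Claim_equal_arabic_to_babylonian : Prop := ∀ (arabic_num : Int), Dom_arabic_to_babylonian arabic_num → Spec_arabic_to_babylonian arabic_num (arabic_to_babylonian arabic_num)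

-- ===== LEMMAS AND PROOFS =====

theorem join_empty_cons (s : String) (l : List String) :
    PySem.Str.join "" (s :: l) = s ++ PySem.Str.join "" l := by
  apply String.toList_inj.mp
  cases l with
  | nil =>
      simp [PySem.Str.join, PySem.Chars.join_singleton, PySem.Chars.join_nil]
  | cons t r =>
      simp [PySem.Str.join]
      rw [PySem.Chars.join_cons_cons]
      simp

theorem pyStrMul_zero (s : String) : pyStrMul s 0 = "" := by
  simp [pyStrMul, PySem.Str.join, PySem.Chars.join_nil]

theorem pyStrMul_succ (s : String) (c : Int) (hc : 0 ≤ c) :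
    pyStrMul s (c + 1) = s ++ pyStrMul s c := by
  have h : (c + 1).toNat = c.toNat + 1 := by omega
  rw [pyStrMul, h, List.replicate_succ, join_empty_cons]
  rfl

theorem floordiv_sub_self (a b : Int) (hb : 0 < b) :
    PySem.Int.floordiv a b = PySem.Int.floordiv (a - b) b + 1 := by
  rw [PySem.Int.floordiv_eq_ediv_of_pos hb, PySem.Int.floordiv_eq_ediv_of_pos hb]
  have h2 : a = (a - b) + 1 * b := by ring
  rw [h2, Int.add_mul_ediv_right _ _ (by omega : b ≠ 0)]
  ring_nf

-- closed form of the while loop: for a positive value it appends ⌊num/value⌋ copies of symbol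
theorem abWhile_eq (value : Int) (hv : 0 < value) (symbol : String) :
    ∀ (num : Int) (acc : String),
      abWhile value symbol num acc =
        (acc ++ (if value ≤ num then pyStrMul symbol (PySem.Int.floordiv num value) else ""),
         num - (if value ≤ num then PySem.Int.floordiv num value else 0) * value) := by
  have main : ∀ (n : Nat) (num : Int), num.toNat = n → ∀ acc,
      abWhile value symbol num acc =
        (acc ++ (if value ≤ num then pyStrMul symbol (PySem.Int.floordiv num value) else ""),
         num - (if value ≤ num then PySem.Int.floordiv num value else 0) * value) := by
    intro n
    induction n using Nat.strong_induction_on with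
    | _ n ih =>
      intro num hn acc
      by_cases hle : value ≤ num
      · rw [abWhile, if_pos ⟨by omega, hle⟩]
        have hrec := ih (num - value).toNat (by omega) (num - value) rfl (acc ++ symbol)
        rw [hrec]
        have hq0 : 0 ≤ PySem.Int.floordiv (num - value) value := by
          rw [PySem.Int.floordiv_eq_ediv_of_pos hv]
          exact Int.ediv_nonneg (by omega) (by omega)
        have hfd : PySem.Int.floordiv num value = PySem.Int.floordiv (num - value) value + 1 :=
          floordiv_sub_self num value hv
        by_cases h2 : value ≤ num - value
        · rw [if_pos h2, if_pos h2, if_pos hle, if_pos hle, hfd,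
            pyStrMul_succ symbol _ hq0, Prod.mk.injEq]
          exact ⟨by rw [String.append_assoc], by ring⟩
        · have hz : PySem.Int.floordiv (num - value) value = 0 := by
            rw [PySem.Int.floordiv_eq_ediv_of_pos hv]
            exact Int.ediv_eq_zero_of_lt (by omega) (by omega)
          rw [if_neg h2, if_neg h2, if_pos hle, if_pos hle, hfd, hz,
            pyStrMul_succ symbol _ le_rfl, pyStrMul_zero, Prod.mk.injEq]
          exact ⟨by rw [String.append_assoc], by ring⟩
      · rw [abWhile, if_neg (by omega)]
        rw [if_neg hle, if_neg hle]
        simp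
  intro num acc
  exact main num.toNat num rfl acc

theorem arabic_to_babylonian_eq_alt (n : Int) :
    arabic_to_babylonian n = arabic_to_babylonian_alt n := by
  have hkeys : PySem.List.sorted
      (PySem.Dict.keys (PySem.Dict.ofList [((1 : Int), "|"), (10, "||"), (100, "|||")]))
      (fun k => k) true = [100, 10, 1] := by decide
  simp only [arabic_to_babylonian, arabic_to_babylonian_alt, hkeys, List.foldl]
  rw [abWhile_eq 100 (by norm_num), abWhile_eq 10 (by norm_num), abWhile_eq 1 (by norm_num)]
  have hd100 : PySem.Dict.getD (PySem.Dict.ofList [((1 : Int), "|"), (10, "||"), (100, "|||")]) 100 "" = "|||" := by decide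
  have hd10 : PySem.Dict.getD (PySem.Dict.ofList [((1 : Int), "|"), (10, "||"), (100, "|||")]) 10 "" = "||" := by decide
  have hd1 : PySem.Dict.getD (PySem.Dict.ofList [((1 : Int), "|"), (10, "||"), (100, "|||")]) 1 "" = "|" := by decide
  have hjnil : PySem.Str.join "" ([] : List String) = "" := rfl
  norm_num
  split_ifs <;>
    simp_all [join_empty_cons, hjnil, hd100, hd10, hd1, String.append_assoc] <;> try omega

-- ===== VERDICT (by name: the statement is the Claim_ definition above) =====
theorem arabic_to_babylonian_spec : Claim_equal_arabic_to_babylonian := by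
  intro n _
  exact arabic_to_babylonian_eq_alt n
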